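-- pv_equiv track=rewrite | github.com/LuisRojas0923/Gestor-de-proyectos-Ti | backend_v2/app/services/novedades_nomina/grancoop_extractor.py | _parsear_totales
-- ===== SOURCE A (Python) =====
-- from typing import List, Dict, Any, Tuple
--
-- def _es_numero(tok: str) -> bool:
--     """True si el token es numérico (ignora puntos y comas de miles)."""
--     return tok.replace(".", "").replace(",", "").isdigit()
--
-- def _parse_numero(tok: str) -> int:
--     """Convierte '1.234.567' o '1234567' a int."""
--     return int(tok.replace(".", "").replace(",", ""))
--
-- def _parsear_totales(linea: str) -> List[int]:
--     """
--     Extrae los últimos 10 tokens numéricos de una línea 'Totales :'.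
--     Retorna lista de 10 enteros.
--     """
--     partes = linea.split()
--     nums: List[int] = []
--     for p in reversed(partes):
--         if _es_numero(p):
--             nums.append(_parse_numero(p))
--         else:
--             break
--     nums.reverse()
--     # Rellenar si hay menos de 10
--     while len(nums) < 10:
--         nums.append(0)
--     return nums[:10]
-- ===== SOURCE B (Python) =====
-- from typing import List
--
-- def _es_numero(tok: str) -> bool:
--     """True si el token es numérico (ignora puntos y comas de miles)."""
--     return tok.replace(".", "").replace(",", "").isdigit()
--
-- def _parse_numero(tok: str) -> int:
--     """Convierte '1.234.567' o '1234567' a int."""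
--     return int(tok.replace(".", "").replace(",", ""))
--
-- def _parsear_totales(linea: str) -> List[int]:
--     """
--     Extrae los ultimos 10 tokens numericos de una linea 'Totales :'.
--     Retorna lista de 10 enteros.
--     """
--     partes = linea.split()
--     last_non = -1
--     for i, p in enumerate(partes):
--         if not _es_numero(p):
--             last_non = i
--     run = [_parse_numero(p) for p in partes[last_non + 1:]]
--     return (run + [0] * 10)[:10]
-- ===== Notes on version B (the rewrite author's own statement) =====
-- stated objective: alternative
-- what changed: B replaces A's backward accumulate-with-break plus in-place reverse and while-pad by a single forward pass that records the last non-numeric token index, then slices the trailing run, maps the parser over it and pads arithmetically with (run + [0]*10)[:10].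
import Mathlib
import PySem

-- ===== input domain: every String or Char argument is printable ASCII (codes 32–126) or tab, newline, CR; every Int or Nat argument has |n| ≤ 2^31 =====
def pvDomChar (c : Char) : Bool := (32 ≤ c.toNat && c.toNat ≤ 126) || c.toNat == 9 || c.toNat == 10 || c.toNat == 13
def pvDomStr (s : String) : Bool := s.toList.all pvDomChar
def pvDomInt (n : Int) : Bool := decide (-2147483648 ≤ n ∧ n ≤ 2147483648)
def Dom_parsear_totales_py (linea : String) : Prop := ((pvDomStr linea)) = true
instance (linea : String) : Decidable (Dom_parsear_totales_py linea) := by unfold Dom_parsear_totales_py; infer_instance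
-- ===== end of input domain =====

-- B does one forward pass recording the last non-numeric token index, then slices the trailing
-- run and pads with (run + [0]*10)[:10], instead of A's backward accumulate-with-break,
-- reverse and while-loop padding; same cost, different decomposition.

-- ===== PORT A =====
-- shared module helpers _es_numero / _parse_numero (used by both Pythons)
def esNumero (tok : String) : Bool :=
  PySem.Str.strIsdigit (PySem.Str.replace (PySem.Str.replace tok "." "") "," "")

-- int() here is guarded by _es_numero at every call site, so ofStr? is always some; getD 0 is unreachable
def parseNumero (tok : String) : Int :=
  (PySem.Int.ofStr? (PySem.Str.replace (PySem.Str.replace tok "." "") "," "")).getD 0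

-- 'for p in reversed(partes): if numeric append else break'
def loopA : List String → List Int → List Int
  | [], nums => nums
  | p :: rest, nums => if esNumero p then loopA rest (nums ++ [parseNumero p]) else nums

-- 'while len(nums) < 10: nums.append(0)'
def padLoop (nums : List Int) : List Int :=
  if nums.length < 10 then padLoop (nums ++ [0]) else nums
termination_by 10 - nums.length
decreasing_by simp; omega

def parsear_totales_py (linea : String) : List Int :=
  let partes := PySem.Str.split₀ linea
  let nums := loopA partes.reverse []
  let nums := nums.reverse
  let nums := padLoop nums
  PySem.List.slice nums none (some 10)

-- ===== PORT B =====
def parsear_totales_py_alt (linea : String) : List Int :=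
  let partes := PySem.Str.split₀ linea
  let lastNon := (PySem.List.enumerate partes).foldl
      (fun acc ip => if !(esNumero ip.2) then ip.1 else acc) (-1 : Int)
  let run := (PySem.List.slice partes (some (lastNon + 1)) none).map parseNumero
  PySem.List.slice (run ++ List.replicate 10 0) none (some 10)

-- ===== PRECONDITION & SPEC =====
def Spec_parsear_totales_py (linea : String) (out : List Int) : Prop := out = parsear_totales_py_alt linea
instance (linea : String) (out : List Int) : Decidable (Spec_parsear_totales_py linea out) := by unfold Spec_parsear_totales_py; infer_instance

-- ===== CLAIM (what is proved, stated in full; the proofs are below) =====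
def Claim_equal_parsear_totales_py : Prop := ∀ (linea : String), Dom_parsear_totales_py linea → Spec_parsear_totales_py linea (parsear_totales_py linea)

-- ===== LEMMAS AND PROOFS =====

def lastNonF (l : List String) : Int :=
  (PySem.List.enumerate l).foldl (fun acc ip => if !(esNumero ip.2) then ip.1 else acc) (-1 : Int)

theorem loopA_eq (l : List String) (acc : List Int) :
    loopA l acc = acc ++ (l.takeWhile esNumero).map parseNumero := by
  induction l generalizing acc with
  | nil => simp [loopA]
  | cons p rest ih =>
    simp only [loopA, List.takeWhile]
    by_cases h : esNumero p <;> simp [h, ih]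

theorem lastNonF_snoc (l : List String) (a : String) :
    lastNonF (l ++ [a]) = if esNumero a then lastNonF l else (l.length : Int) := by
  simp only [lastNonF, PySem.List.enumerate_append, List.foldl_append]
  by_cases h : esNumero a <;> simp [PySem.List.enumerate, h]

theorem lastNonF_bounds (l : List String) :
    -1 ≤ lastNonF l ∧ lastNonF l < l.length := by
  induction l using List.reverseRecOn with
  | nil => simp [lastNonF, PySem.List.enumerate]
  | append_singleton l a ih =>
    rw [lastNonF_snoc]
    by_cases h : esNumero a
    · simp [h]; omega
    · simp [h]

theorem key (l : List String) :
    (l.reverse.takeWhile esNumero).reverse = l.drop (lastNonF l + 1).toNat := by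
  induction l using List.reverseRecOn with
  | nil => simp
  | append_singleton l a ih =>
    rw [lastNonF_snoc]
    by_cases h : esNumero a
    · have hb := lastNonF_bounds l
      have hle : (lastNonF l + 1).toNat ≤ l.length := by omega
      simp [h, ih, List.drop_append_of_le_length hle]
    · simp [h]

theorem padLoop_eq (nums : List Int) :
    padLoop nums = nums ++ List.replicate (10 - nums.length) 0 := by
  by_cases h : nums.length < 10
  · rw [padLoop, if_pos h, padLoop_eq (nums ++ [0])]
    have : 10 - nums.length = (10 - (nums ++ [0]).length) + 1 := by simp; omega
    rw [this, List.replicate_succ, List.append_assoc]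
    rfl
  · rw [padLoop, if_neg h]
    have : 10 - nums.length = 0 := by omega
    simp [this]
termination_by 10 - nums.length
decreasing_by simp; omega

theorem take_pad (nums : List Int) :
    (padLoop nums).take 10 = (nums ++ List.replicate 10 0).take 10 := by
  rw [padLoop_eq, List.take_append, List.take_append, List.take_replicate, List.take_replicate]
  congr 2
  omega

-- ===== VERDICT (by name: the statement is the Claim_ definition above) =====
theorem parsear_totales_py_spec : Claim_equal_parsear_totales_py := by
  intro linea _
  unfold Spec_parsear_totales_py parsear_totales_py parsear_totales_py_alt
  have hfold : (PySem.List.enumerate (PySem.Str.split₀ linea)).foldl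
      (fun acc ip => if !(esNumero ip.2) then ip.1 else acc) (-1 : Int)
      = lastNonF (PySem.Str.split₀ linea) := rfl
  simp only [loopA_eq, List.nil_append, hfold]
  have hb := lastNonF_bounds (PySem.Str.split₀ linea)
  have h1 := PySem.List.slice_from (PySem.Str.split₀ linea)
      (a := lastNonF (PySem.Str.split₀ linea) + 1) (by omega)
  have h2 : ∀ (xs : List Int), PySem.List.slice xs none (some 10) = xs.take 10 := by
    intro xs
    have h := PySem.List.slice_to xs (b := 10) (by norm_num)
    simpa using h
  rw [h1, ← List.map_reverse, key, h2, h2, take_pad]
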